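-- pv_equiv track=rewrite | github.com/manwar/perlweeklychallenge-club | challenge-148/paulo-custodio/python/ch-2.py | cardano_triplets
-- ===== SOURCE A (Python) =====
-- from math import isqrt
-- from itertools import chain
--
-- def cardano_triplets(num):
--     triplets = []
--     K = 0
--     while len(triplets) < num * 2:  # we are not sure in which order they are generated
--         A = 2 + 3 * K
--         T = (K + 1) ** 2 * (8 * K + 5)
--         divs = divisors(T)
--         for div in divs:
--             if isqrt(div) ** 2 == div:
--                 B = isqrt(div)
--                 C = T // (B ** 2)
--                 triplets.append((A, B, C))
--         triplets.sort(key=lambda x: sum(x))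
--         K += 1
--
--     return triplets[:num]
--
-- def divisors(n):
--     divs1 = []
--     divs2 = []
--     for k in range(1, n + 1):
--         if divs2 and k >= divs2[0]:
--             break
--         if n % k == 0:
--             divs1.append(k)
--             divs2.insert(0, n // k)
--     return list(chain(divs1, divs2))
-- ===== SOURCE B (Python) =====
-- from math import isqrt
--
-- def cardano_triplets(num):
--     # Enumerate square divisors of T directly as b*b (b = 1..isqrt(T)) instead of
--     # building the full divisor list and filtering perfect squares.
--     triplets = []
--     K = 0
--     while len(triplets) < num * 2:
--         A = 2 + 3 * K
--         T = (K + 1) ** 2 * (8 * K + 5)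
--         for b in range(1, isqrt(T) + 1):
--             if T % (b * b) == 0:
--                 triplets.append((A, b, T // (b * b)))
--         triplets.sort(key=lambda x: sum(x))
--         K += 1
--     return triplets[:num]
-- ===== Notes on version B (the rewrite author's own statement) =====
-- stated objective: alternative
-- what changed: Per K, instead of building the full divisor list of T with two-list trial division (with its break-at-cofactor scan) and then filtering it for perfect squares via isqrt, B enumerates the square divisors directly as b*b for b = 1..isqrt(T) with a single divisibility test, emitting (A, b, T//(b*b)) immediately; outer loop, sort and final slice are unchanged.
import Mathlib
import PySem

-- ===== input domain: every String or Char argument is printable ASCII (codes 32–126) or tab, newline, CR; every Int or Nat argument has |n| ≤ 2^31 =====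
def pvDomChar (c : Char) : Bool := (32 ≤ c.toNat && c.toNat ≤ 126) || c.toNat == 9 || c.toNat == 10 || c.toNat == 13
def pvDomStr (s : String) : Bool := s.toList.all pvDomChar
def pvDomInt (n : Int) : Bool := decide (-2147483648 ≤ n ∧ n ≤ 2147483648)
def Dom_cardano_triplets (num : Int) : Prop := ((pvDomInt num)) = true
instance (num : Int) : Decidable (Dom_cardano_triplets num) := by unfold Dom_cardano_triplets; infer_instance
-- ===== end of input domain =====

-- B replaces A's divisor-list construction + perfect-square filter by direct enumeration of
-- square divisors b*b (b = 1 .. isqrt(T)); outer loop, sort and final slice are unchanged.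

-- ===== PORT A =====
-- math.isqrt(n): exact for 0 ≤ n (every call here has a nonnegative argument)
def pvSqrt (n : Int) : Int := (Nat.sqrt n.toNat : Int)

-- the 'for k in range(1, n+1)' loop of divisors(), with its break and the two lists
def pvDivisorsGo (n : Int) : List Int → List Int → List Int → List Int
  | [], d1, d2 => d1 ++ d2
  | k :: ks, d1, d2 =>
    if (!d2.isEmpty) && (d2.headD 0 ≤ k : Bool) then d1 ++ d2   -- if divs2 and k >= divs2[0]: break
    else if PySem.Int.mod n k == 0 then
      pvDivisorsGo n ks (d1 ++ [k]) (PySem.Int.floordiv n k :: d2)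
    else
      pvDivisorsGo n ks d1 d2

def pvDivisors (n : Int) : List Int :=
  pvDivisorsGo n (PySem.List.pyRange 1 (n + 1) 1) [] []

-- the while-loop; fuel is a totality guard only: every pass appends at least the triplet for
-- divisor 1, so (num*2)+1 passes always reach Python's stop condition 'len(triplets) >= num*2'
def pvLoopA (num : Int) : Nat → Int → List (Int × Int × Int) → List (Int × Int × Int)
  | 0, _, tr => tr
  | fuel + 1, k, tr =>
    if (tr.length : Int) < num * 2 then
      let a := 2 + 3 * k
      let t := (k + 1) ^ 2 * (8 * k + 5)
      let tr' := (pvDivisors t).foldl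
        (fun acc dv =>
          if pvSqrt dv ^ 2 == dv then
            acc ++ [(a, pvSqrt dv, PySem.Int.floordiv t (pvSqrt dv ^ 2))]
          else acc) tr
      pvLoopA num fuel (k + 1) (PySem.List.sorted tr' (fun x => x.1 + x.2.1 + x.2.2))
    else tr

def cardano_triplets (num : Int) : List (Int × Int × Int) :=
  PySem.List.slice (pvLoopA num ((num * 2).toNat + 1) 0 []) none (some num)

-- ===== PORT B =====
def pvLoopB (num : Int) : Nat → Int → List (Int × Int × Int) → List (Int × Int × Int)
  | 0, _, tr => tr
  | fuel + 1, k, tr =>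
    if (tr.length : Int) < num * 2 then
      let a := 2 + 3 * k
      let t := (k + 1) ^ 2 * (8 * k + 5)
      let tr' := (PySem.List.pyRange 1 (pvSqrt t + 1) 1).foldl
        (fun acc b =>
          if PySem.Int.mod t (b * b) == 0 then
            acc ++ [(a, b, PySem.Int.floordiv t (b * b))]
          else acc) tr
      pvLoopB num fuel (k + 1) (PySem.List.sorted tr' (fun x => x.1 + x.2.1 + x.2.2))
    else tr

def cardano_triplets_alt (num : Int) : List (Int × Int × Int) :=
  PySem.List.slice (pvLoopB num ((num * 2).toNat + 1) 0 []) none (some num)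

-- ===== PRECONDITION & SPEC =====
def Spec_cardano_triplets (num : Int) (out : List (Int × Int × Int)) : Prop := out = cardano_triplets_alt num
instance (num : Int) (out : List (Int × Int × Int)) : Decidable (Spec_cardano_triplets num out) := by unfold Spec_cardano_triplets; infer_instance

-- ===== CLAIM (what is proved, stated in full; the proofs are below) =====
def Claim_equal_cardano_triplets : Prop := ∀ (num : Int), Dom_cardano_triplets num → Spec_cardano_triplets num (cardano_triplets num)

-- ===== LEMMAS AND PROOFS =====

-- ascending divisors of n up to j, and the matching cofactor list (divs1 / divs2 of A's loop)
def pvDivL (n j : Int) : List Int :=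
  (PySem.List.pyRange 1 (j + 1) 1).filter (fun k => PySem.Int.mod n k == 0)

def pvCofs (n j : Int) : List Int :=
  ((pvDivL n j).map (fun d => PySem.Int.floordiv n d)).reverse

lemma pvSqrt_nonneg (n : Int) : 0 ≤ pvSqrt n := by
  simp [pvSqrt]

lemma pvSqrt_le {n : Int} (h : 0 ≤ n) : pvSqrt n * pvSqrt n ≤ n := by
  unfold pvSqrt
  rw [← Int.toNat_of_nonneg h]
  have h2 := Nat.sqrt_le' n.toNat
  rw [Nat.pow_two] at h2
  exact_mod_cast h2

lemma lt_pvSqrt_succ {n : Int} (h : 0 ≤ n) : n < (pvSqrt n + 1) * (pvSqrt n + 1) := by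
  unfold pvSqrt
  conv_lhs => rw [← Int.toNat_of_nonneg h]
  have h2 := Nat.lt_succ_sqrt' n.toNat
  rw [Nat.succ_eq_add_one, Nat.pow_two] at h2
  exact_mod_cast h2

lemma pvSqrt_sq {b : Int} (hb : 0 ≤ b) : pvSqrt (b * b) = b := by
  have h1 : (b * b).toNat = b.toNat * b.toNat := Int.toNat_mul hb hb
  unfold pvSqrt
  rw [h1, ← Nat.pow_two, Nat.sqrt_eq']
  omega

lemma pvSqrt_one_le {n : Int} (h : 2 ≤ n) : 1 ≤ pvSqrt n := by
  unfold pvSqrt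
  have : 0 < Nat.sqrt n.toNat := Nat.sqrt_pos.mpr (by omega)
  omega

lemma pvSqrt_lt_self {n : Int} (h : 2 ≤ n) : pvSqrt n < n := by
  unfold pvSqrt
  have : Nat.sqrt n.toNat < n.toNat := Nat.sqrt_lt_self (by omega)
  omega

lemma mem_pvDivL {n j x : Int} : x ∈ pvDivL n j ↔ 1 ≤ x ∧ x ≤ j ∧ x ∣ n := by
  simp [pvDivL, List.mem_filter, PySem.List.mem_pyRange_one, PySem.Int.mod_eq_zero_iff_dvd]
  omega

lemma pvDivL_zero (n : Int) : pvDivL n 0 = [] := by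
  simp [pvDivL, PySem.List.pyRange_one_eq_nil (by omega : (1:Int) ≤ 1)]

lemma pvCofs_zero (n : Int) : pvCofs n 0 = [] := by
  simp [pvCofs, pvDivL_zero]

lemma pvDivL_succ {n j : Int} (hj : 1 ≤ j) :
    pvDivL n j = pvDivL n (j - 1) ++ (if PySem.Int.mod n j = 0 then [j] else []) := by
  unfold pvDivL
  rw [show j - 1 + 1 = j from by ring, PySem.List.pyRange_one_succ_right hj, List.filter_append]
  by_cases h : PySem.Int.mod n j = 0
  · simp [List.filter, h]
  · simp [List.filter, beq_eq_false_iff_ne.mpr h, h]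

lemma pairwise_pvDivL (n j : Int) : (pvDivL n j).Pairwise (· < ·) := by
  exact (PySem.List.pairwise_lt_pyRange_one 1 (j + 1)).filter _

-- last element of a strictly increasing list bounds all members
lemma le_getLast?_of_pairwise : ∀ {l : List Int} {m : Int}, l.Pairwise (· < ·) →
    l.getLast? = some m → ∀ x ∈ l, x ≤ m := by
  intro l
  induction l with
  | nil => simp
  | cons a t ih =>
    intro m hp hl x hx
    obtain ⟨ha, hp'⟩ := List.pairwise_cons.mp hp
    cases t with
    | nil =>
      simp only [List.getLast?_singleton, Option.some.injEq] at hl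
      simp only [List.mem_singleton] at hx
      omega
    | cons b t' =>
      rw [List.getLast?_cons_cons] at hl
      rcases List.mem_cons.mp hx with rfl | hx'
      · exact le_of_lt (ha m (List.mem_of_getLast? hl))
      · exact ih hp' hl x hx'

lemma pvDivL_ne_nil {n j : Int} (hj : 1 ≤ j) : pvDivL n j ≠ [] :=
  List.ne_nil_of_mem (mem_pvDivL.mpr ⟨le_refl 1, hj, one_dvd n⟩)

lemma cof_pos {n d : Int} (hn : 2 ≤ n) (hd1 : 1 ≤ d) (hdvd : d ∣ n) : 1 ≤ n / d := by
  have h := Int.ediv_mul_cancel hdvd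
  by_contra hcon
  push Not at hcon
  have h2 : n / d * d ≤ 0 := mul_nonpos_iff.mpr (Or.inr ⟨by omega, by omega⟩)
  omega

lemma pvCofs_headD {n j : Int} (hj : 1 ≤ j) :
    ∃ dm, dm ∈ pvDivL n j ∧ (∀ d ∈ pvDivL n j, d ≤ dm) ∧
      pvCofs n j ≠ [] ∧ (pvCofs n j).headD 0 = PySem.Int.floordiv n dm := by
  have hne := pvDivL_ne_nil (n := n) hj
  obtain ⟨dm, hdm⟩ : ∃ dm, (pvDivL n j).getLast? = some dm := by
    cases h : (pvDivL n j).getLast? with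
    | some d => exact ⟨d, rfl⟩
    | none => exact absurd (List.getLast?_eq_none_iff.mp h) hne
  have hcne : pvCofs n j ≠ [] := by
    simp only [pvCofs, ne_eq, List.reverse_eq_nil_iff, List.map_eq_nil_iff]
    exact hne
  have h1 : (pvCofs n j).head? = some (PySem.Int.floordiv n dm) := by
    simp [pvCofs, List.head?_reverse, List.getLast?_map, hdm]
  refine ⟨dm, List.mem_of_getLast? hdm, le_getLast?_of_pairwise (pairwise_pvDivL n j) hdm, hcne, ?_⟩
  cases hc : pvCofs n j with
  | nil => exact absurd hc hcne
  | cons y ys =>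
    rw [hc] at h1
    simp only [List.head?_cons, Option.some.injEq] at h1
    simp [h1]

-- phase B: past isqrt(n), the loop never appends again, and returns divs1 ++ divs2
lemma phaseB_aux {n : Int} (hn : 2 ≤ n) : ∀ (fuel : Nat) (k : Int), pvSqrt n + 1 ≤ k →
    (n + 1 - k).toNat = fuel →
      pvDivisorsGo n (PySem.List.pyRange k (n + 1) 1) (pvDivL n (pvSqrt n)) (pvCofs n (pvSqrt n))
        = pvDivL n (pvSqrt n) ++ pvCofs n (pvSqrt n) := by
  intro fuel
  induction fuel with
  | zero =>
    intro k hk hf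
    rw [PySem.List.pyRange_one_eq_nil (by omega)]
    rfl
  | succ fuel ih =>
    intro k hk hf
    have hs1 : 1 ≤ pvSqrt n := pvSqrt_one_le hn
    have hs0 : (0:Int) ≤ n := by omega
    have hssq : pvSqrt n * pvSqrt n ≤ n := pvSqrt_le hs0
    have hlt : n < (pvSqrt n + 1) * (pvSqrt n + 1) := lt_pvSqrt_succ hs0
    obtain ⟨dm, hdmem, hdmax, hcne, hchead⟩ := pvCofs_headD (n := n) hs1
    obtain ⟨hdm1, hdms, hdmdvd⟩ := mem_pvDivL.mp hdmem
    have hfdm : n / dm * dm = n := Int.ediv_mul_cancel hdmdvd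
    have hfd1 : 1 ≤ n / dm := cof_pos hn hdm1 hdmdvd
    rw [PySem.List.pyRange_one_cons (by omega : k < n + 1)]
    simp only [pvDivisorsGo]
    rw [hchead, PySem.Int.floordiv_eq_ediv_of_pos (by omega : (0:Int) < dm)]
    by_cases hbrk : n / dm ≤ k
    · rw [if_pos (by simp [hcne, hbrk])]
    · rw [if_neg (by simp [hbrk])]
      have hknd : ¬ ((PySem.Int.mod n k == 0) = true) := by
        simp only [beq_iff_eq, PySem.Int.mod_eq_zero_iff_dvd]
        intro hdvd
        have hek : n / k * k = n := Int.ediv_mul_cancel hdvd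
        have he1 : 1 ≤ n / k := cof_pos hn (by omega) hdvd
        have hes : n / k ≤ pvSqrt n := by
          by_contra hcon; push Not at hcon
          have h1 : (pvSqrt n + 1) * (pvSqrt n + 1) ≤ (n / k) * k :=
            mul_le_mul (by omega) (by omega) (by omega) (by omega)
          omega
        have hemem : n / k ∈ pvDivL n (pvSqrt n) := mem_pvDivL.mpr ⟨he1, hes, ⟨k, hek.symm⟩⟩
        have hele : n / k ≤ dm := hdmax _ hemem
        have hckle : n / dm ≤ k := by
          by_contra hcon2; push Not at hcon2
          have h2 : (n / k) * k ≤ dm * k := mul_le_mul_of_nonneg_right hele (by omega)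
          have h3 : (k + 1) * dm ≤ (n / dm) * dm := mul_le_mul_of_nonneg_right (by omega) (by omega)
          nlinarith [hek, hfdm]
        omega
      rw [if_neg hknd]
      exact ih (k + 1) (by omega) (by omega)

lemma phaseB {n : Int} (hn : 2 ≤ n) :
    ∀ k : Int, pvSqrt n + 1 ≤ k →
      pvDivisorsGo n (PySem.List.pyRange k (n + 1) 1) (pvDivL n (pvSqrt n)) (pvCofs n (pvSqrt n))
        = pvDivL n (pvSqrt n) ++ pvCofs n (pvSqrt n) := fun k hk =>
  phaseB_aux hn (n + 1 - k).toNat k hk rfl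

-- phase A: up to isqrt(n) the loop never breaks and accumulates divisors and cofactors
lemma phaseA_aux {n : Int} (hn : 2 ≤ n) : ∀ (fuel : Nat) (j : Int), 1 ≤ j → j ≤ pvSqrt n + 1 →
    (pvSqrt n + 1 - j).toNat = fuel →
      pvDivisorsGo n (PySem.List.pyRange j (n + 1) 1) (pvDivL n (j - 1)) (pvCofs n (j - 1))
        = pvDivL n (pvSqrt n) ++ pvCofs n (pvSqrt n) := by
  intro fuel
  induction fuel with
  | zero =>
    intro j hj1 hjs hf
    have hj : j = pvSqrt n + 1 := by omega
    subst hj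
    rw [show pvSqrt n + 1 - 1 = pvSqrt n from by ring]
    exact phaseB hn (pvSqrt n + 1) le_rfl
  | succ fuel ih =>
    intro j hj1 hjs hf
    have hjs' : j ≤ pvSqrt n := by omega
    have hs0 : (0:Int) ≤ n := by omega
    have hssq := pvSqrt_le hs0
    have hsn : pvSqrt n < n := pvSqrt_lt_self hn
    rw [PySem.List.pyRange_one_cons (by omega : j < n + 1)]
    simp only [pvDivisorsGo]
    have hnobrk : ((!(pvCofs n (j-1)).isEmpty) && decide ((pvCofs n (j-1)).headD 0 ≤ j)) = false := by
      by_cases hD : 1 ≤ j - 1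
      · obtain ⟨dm, hdmem, _, hcne, hchead⟩ := pvCofs_headD (n := n) hD
        obtain ⟨hdm1, hdmj, hdmdvd⟩ := mem_pvDivL.mp hdmem
        have hfdm : n / dm * dm = n := Int.ediv_mul_cancel hdmdvd
        have hfd1 : 1 ≤ n / dm := cof_pos hn hdm1 hdmdvd
        have hgt : j < n / dm := by
          by_contra hcon; push Not at hcon
          have h1 : n / dm * dm ≤ j * (j - 1) := mul_le_mul hcon hdmj (by omega) (by omega)
          have h2 : j * j ≤ pvSqrt n * pvSqrt n := mul_le_mul hjs' hjs' (by omega) (by omega)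
          nlinarith [hfdm]
        rw [hchead, PySem.Int.floordiv_eq_ediv_of_pos (by omega : (0:Int) < dm)]
        simp [show ¬ (n / dm ≤ j) from by omega]
      · have hj1' : j = 1 := by omega
        subst hj1'
        simp [pvCofs, pvDivL_zero]
    rw [hnobrk]
    simp only [Bool.false_eq_true, if_false]
    by_cases hdv : PySem.Int.mod n j = 0
    · rw [if_pos (by simp [hdv])]
      have hd1' : pvDivL n (j - 1) ++ [j] = pvDivL n ((j + 1) - 1) := by
        rw [show j + 1 - 1 = j from by ring, pvDivL_succ hj1]
        simp [hdv]
      have hd2' : PySem.Int.floordiv n j :: pvCofs n (j - 1) = pvCofs n ((j + 1) - 1) := by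
        rw [show j + 1 - 1 = j from by ring]
        simp [pvCofs, pvDivL_succ hj1, hdv]
      rw [hd1', hd2']
      exact ih (j + 1) (by omega) (by omega) (by omega)
    · rw [if_neg (by simp [hdv])]
      have hsame : pvDivL n (j - 1) = pvDivL n ((j + 1) - 1) := by
        rw [show j + 1 - 1 = j from by ring, pvDivL_succ hj1]
        simp [hdv]
      have hsame2 : pvCofs n (j - 1) = pvCofs n ((j + 1) - 1) := by
        simp only [pvCofs, ← hsame]
      rw [hsame, hsame2]
      exact ih (j + 1) (by omega) (by omega) (by omega)

lemma phaseA {n : Int} (hn : 2 ≤ n) :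
    ∀ j : Int, 1 ≤ j → j ≤ pvSqrt n + 1 →
      pvDivisorsGo n (PySem.List.pyRange j (n + 1) 1) (pvDivL n (j - 1)) (pvCofs n (j - 1))
        = pvDivL n (pvSqrt n) ++ pvCofs n (pvSqrt n) := fun j hj1 hjs =>
  phaseA_aux hn (pvSqrt n + 1 - j).toNat j hj1 hjs rfl

lemma pvDivisors_eq {n : Int} (hn : 2 ≤ n) :
    pvDivisors n = pvDivL n (pvSqrt n) ++ pvCofs n (pvSqrt n) := by
  have h := phaseA hn 1 (by omega) (by have := pvSqrt_one_le hn; omega)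
  simpa [pvDivisors, pvDivL_zero, pvCofs_zero] using h

lemma mem_pvCofs {n j x : Int} :
    x ∈ pvCofs n j ↔ ∃ d ∈ pvDivL n j, x = PySem.Int.floordiv n d := by
  simp only [pvCofs, List.mem_reverse, List.mem_map]
  constructor
  · rintro ⟨d, hd, rfl⟩; exact ⟨d, hd, rfl⟩
  · rintro ⟨d, hd, rfl⟩; exact ⟨d, hd, rfl⟩

lemma mem_pvDivisors {n x : Int} (hn : 2 ≤ n) :
    x ∈ pvDivisors n ↔ 1 ≤ x ∧ x ∣ n := by
  have hs0 : (0:Int) ≤ n := by omega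
  have hssq := pvSqrt_le hs0
  have hlt := lt_pvSqrt_succ hs0
  rw [pvDivisors_eq hn, List.mem_append]
  constructor
  · rintro (hd | hc)
    · obtain ⟨h1, _, h3⟩ := mem_pvDivL.mp hd
      exact ⟨h1, h3⟩
    · obtain ⟨d, hd, rfl⟩ := mem_pvCofs.mp hc
      obtain ⟨h1, h2, h3⟩ := mem_pvDivL.mp hd
      rw [PySem.Int.floordiv_eq_ediv_of_pos (by omega : (0:Int) < d)]
      exact ⟨cof_pos hn h1 h3, ⟨d, (Int.ediv_mul_cancel h3).symm⟩⟩
  · rintro ⟨h1, hdvd⟩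
    by_cases hxs : x ≤ pvSqrt n
    · exact Or.inl (mem_pvDivL.mpr ⟨h1, hxs, hdvd⟩)
    · right
      push Not at hxs
      have hsnn : 0 ≤ pvSqrt n := pvSqrt_nonneg n
      have hex : n / x * x = n := Int.ediv_mul_cancel hdvd
      have he1 : 1 ≤ n / x := cof_pos hn h1 hdvd
      set e := n / x with he
      have hes : e ≤ pvSqrt n := by
        by_contra hcon; push Not at hcon
        have hh : (pvSqrt n + 1) * (pvSqrt n + 1) ≤ e * x :=
          mul_le_mul (by omega) (by omega) (by omega) (by omega)
        omega
      refine mem_pvCofs.mpr ⟨e, mem_pvDivL.mpr ⟨he1, hes, ⟨x, hex.symm⟩⟩, ?_⟩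
      rw [PySem.Int.floordiv_eq_ediv_of_pos (by omega : (0:Int) < e)]
      rw [← hex]
      exact (Int.mul_ediv_cancel_left x (by omega)).symm

lemma pairwise_pvDivisors {n : Int} (hn : 2 ≤ n) (hsq : pvSqrt n ^ 2 ≠ n) :
    (pvDivisors n).Pairwise (· < ·) := by
  have hs0 : (0:Int) ≤ n := by omega
  have hssq := pvSqrt_le hs0
  have hcross : ∀ d ∈ pvDivL n (pvSqrt n), pvSqrt n < n / d := by
    intro d hd
    obtain ⟨h1, h2, h3⟩ := mem_pvDivL.mp hd
    have hfd : n / d * d = n := Int.ediv_mul_cancel h3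
    by_contra hcon; push Not at hcon
    have hh : n / d * d ≤ pvSqrt n * pvSqrt n :=
      mul_le_mul hcon h2 (by omega) (by omega)
    have : n = pvSqrt n * pvSqrt n := by omega
    exact hsq (by rw [pow_two]; omega)
  rw [pvDivisors_eq hn, List.pairwise_append]
  refine ⟨pairwise_pvDivL n _, ?_, ?_⟩
  · unfold pvCofs
    rw [List.pairwise_reverse, List.pairwise_map]
    refine (pairwise_pvDivL n (pvSqrt n)).imp_of_mem ?_
    intro d e hd he hde
    obtain ⟨hd1, hd2, hd3⟩ := mem_pvDivL.mp hd
    obtain ⟨he1, he2, he3⟩ := mem_pvDivL.mp he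
    have hfd : n / d * d = n := Int.ediv_mul_cancel hd3
    have hfe : n / e * e = n := Int.ediv_mul_cancel he3
    have hfd1 : 1 ≤ n / d := cof_pos hn hd1 hd3
    have hfe1 : 1 ≤ n / e := cof_pos hn he1 he3
    rw [PySem.Int.floordiv_eq_ediv_of_pos (by omega : (0:Int) < d),
        PySem.Int.floordiv_eq_ediv_of_pos (by omega : (0:Int) < e)]
    by_contra hcon; push Not at hcon
    have h2 : (n / d) * d ≤ (n / e) * d := mul_le_mul_of_nonneg_right hcon (by omega)
    have h3 : (n / e) * (d + 1) ≤ (n / e) * e := mul_le_mul_of_nonneg_left (by omega) (by omega)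
    nlinarith [hfd, hfe]
  · intro a ha b hb
    obtain ⟨ha1, ha2, _⟩ := mem_pvDivL.mp ha
    obtain ⟨d, hd, rfl⟩ := mem_pvCofs.mp hb
    obtain ⟨hd1, _, hd3⟩ := mem_pvDivL.mp hd
    rw [PySem.Int.floordiv_eq_ediv_of_pos (by omega : (0:Int) < d)]
    exact lt_of_le_of_lt ha2 (hcross d hd)

-- equality of strictly increasing integer lists with the same members
lemma eq_of_pairwise_lt_of_mem_iff : ∀ {l₁ l₂ : List Int}, l₁.Pairwise (· < ·) →
    l₂.Pairwise (· < ·) → (∀ x, x ∈ l₁ ↔ x ∈ l₂) → l₁ = l₂ := by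
  intro l₁
  induction l₁ with
  | nil =>
    intro l₂ _ _ hmem
    cases l₂ with
    | nil => rfl
    | cons b t₂ => exact absurd ((hmem b).mpr (List.mem_cons_self ..)) (List.not_mem_nil)
  | cons a t ih =>
    intro l₂ h1 h2 hmem
    cases l₂ with
    | nil => exact absurd ((hmem a).mp (List.mem_cons_self ..)) (List.not_mem_nil)
    | cons b t₂ =>
      obtain ⟨ha1, ht1⟩ := List.pairwise_cons.mp h1
      obtain ⟨hb2, ht2⟩ := List.pairwise_cons.mp h2
      have hab : a = b := by
        rcases List.mem_cons.mp ((hmem a).mp (List.mem_cons_self ..)) with h | h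
        · exact h
        · rcases List.mem_cons.mp ((hmem b).mpr (List.mem_cons_self ..)) with h' | h'
          · exact h'.symm
          · have u1 := ha1 b h'
            have u2 := hb2 a h
            omega
      subst hab
      have htails : ∀ x, x ∈ t ↔ x ∈ t₂ := by
        intro x
        constructor
        · intro hx
          have hax := ha1 x hx
          rcases List.mem_cons.mp ((hmem x).mp (List.mem_cons_of_mem _ hx)) with h | h
          · omega
          · exact h
        · intro hx
          have hax := hb2 x hx
          rcases List.mem_cons.mp ((hmem x).mpr (List.mem_cons_of_mem _ hx)) with h | h
          · omega
          · exact h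
      rw [ih ht1 ht2 htails]

-- the square divisors of n, in ascending order, are exactly b*b for b = 1..isqrt(n), b*b ∣ n
lemma squares_eq {n : Int} (hn : 2 ≤ n) (hsq : pvSqrt n ^ 2 ≠ n) :
    (pvDivisors n).filter (fun d => pvSqrt d ^ 2 == d)
      = ((PySem.List.pyRange 1 (pvSqrt n + 1) 1).filter
          (fun b => PySem.Int.mod n (b * b) == 0)).map (fun b => b * b) := by
  have hs0 : (0:Int) ≤ n := by omega
  have hlt := lt_pvSqrt_succ hs0
  apply eq_of_pairwise_lt_of_mem_iff
  · exact (pairwise_pvDivisors hn hsq).filter _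
  · rw [List.pairwise_map]
    refine ((PySem.List.pairwise_lt_pyRange_one 1 (pvSqrt n + 1)).filter _).imp_of_mem ?_
    intro a b ha hb hab
    have ha1 : 1 ≤ a := (PySem.List.mem_pyRange_one.mp (List.mem_of_mem_filter ha)).1
    nlinarith
  · intro x
    simp only [List.mem_filter, List.mem_map, beq_iff_eq, PySem.Int.mod_eq_zero_iff_dvd,
      PySem.List.mem_pyRange_one]
    constructor
    · rintro ⟨hmem, hsqx⟩
      obtain ⟨hx1, hxdvd⟩ := (mem_pvDivisors hn).mp hmem
      have hb0 : 0 ≤ pvSqrt x := pvSqrt_nonneg x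
      have hbb : pvSqrt x * pvSqrt x = x := by rw [← pow_two]; exact hsqx
      have hb1 : 1 ≤ pvSqrt x := by nlinarith
      have hxn : x ≤ n := Int.le_of_dvd (by omega) hxdvd
      have hbs : pvSqrt x < pvSqrt n + 1 := by
        have hsnn : 0 ≤ pvSqrt n := pvSqrt_nonneg n
        by_contra hcon; push Not at hcon
        have hh : (pvSqrt n + 1) * (pvSqrt n + 1) ≤ pvSqrt x * pvSqrt x :=
          mul_le_mul hcon hcon (by omega) (by omega)
        omega
      exact ⟨pvSqrt x, ⟨⟨hb1, hbs⟩, by rw [hbb]; exact hxdvd⟩, hbb⟩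
    · rintro ⟨b, ⟨⟨hb1, _⟩, hbdvd⟩, rfl⟩
      refine ⟨(mem_pvDivisors hn).mpr ⟨by nlinarith, hbdvd⟩, ?_⟩
      rw [pow_two, pvSqrt_sq (by omega : (0:Int) ≤ b)]

lemma T_ge_two {k : Int} (hk : 0 ≤ k) : 2 ≤ (k + 1) ^ 2 * (8 * k + 5) := by
  nlinarith

lemma T_not_square {k : Int} (hk : 0 ≤ k) :
    pvSqrt ((k + 1) ^ 2 * (8 * k + 5)) ^ 2 ≠ (k + 1) ^ 2 * (8 * k + 5) := by
  intro h
  have hs0 : 0 ≤ pvSqrt ((k + 1) ^ 2 * (8 * k + 5)) := pvSqrt_nonneg _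
  set r := pvSqrt ((k + 1) ^ 2 * (8 * k + 5)) with hr
  rw [pow_two] at h
  have ha0 : (0:Int) ≤ k + 1 := by omega
  have hm0 : (0:Int) ≤ 8 * k + 5 := by omega
  have hT : (k + 1) ^ 2 * (8 * k + 5) = ((k + 1) * (k + 1)) * (8 * k + 5) := by ring
  rw [hT] at h
  have h1 : (r * r).toNat = r.toNat * r.toNat := Int.toNat_mul hs0 hs0
  have h2 : (((k + 1) * (k + 1)) * (8 * k + 5)).toNat
      = ((k + 1).toNat * (k + 1).toNat) * (8 * k + 5).toNat := by
    rw [Int.toNat_mul (by positivity) hm0, Int.toNat_mul ha0 ha0]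
  have hnat : r.toNat * r.toNat = ((k + 1).toNat * (k + 1).toNat) * (8 * k + 5).toNat := by
    rw [← h1, ← h2, h]
  set a := (k + 1).toNat with hadef
  set m := (8 * k + 5).toNat with hmdef
  have ha1 : 1 ≤ a := by omega
  have hm8 : m % 8 = 5 := by omega
  have hadvd : a ∣ r.toNat := by
    have hsq : a ^ 2 ∣ r.toNat ^ 2 := by
      rw [pow_two, pow_two]
      exact ⟨m, hnat⟩
    exact (Nat.pow_dvd_pow_iff (by norm_num : 2 ≠ 0)).mp hsq
  obtain ⟨c, hc⟩ := hadvd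
  have hmc : m = c * c := by
    have hx : a * a * (c * c) = a * a * m := by
      calc a * a * (c * c) = (a * c) * (a * c) := by ring
        _ = a * a * m := by rw [← hc]; exact hnat
    exact (Nat.eq_of_mul_eq_mul_left (by positivity) hx).symm
  have h8 : c * c % 8 = c % 8 * (c % 8) % 8 := Nat.mul_mod c c 8
  have hq : c % 8 < 8 := Nat.mod_lt _ (by norm_num)
  have hcase : c % 8 = 0 ∨ c % 8 = 1 ∨ c % 8 = 2 ∨ c % 8 = 3 ∨ c % 8 = 4 ∨ c % 8 = 5
      ∨ c % 8 = 6 ∨ c % 8 = 7 := by omega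
  rcases hcase with h' | h' | h' | h' | h' | h' | h' | h' <;> rw [h'] at h8 <;> omega

lemma inner_eq {t a : Int} (ht : 2 ≤ t) (hsq : pvSqrt t ^ 2 ≠ t)
    (tr : List (Int × Int × Int)) :
    (pvDivisors t).foldl
        (fun acc dv =>
          if pvSqrt dv ^ 2 == dv then
            acc ++ [(a, pvSqrt dv, PySem.Int.floordiv t (pvSqrt dv ^ 2))]
          else acc) tr
      = (PySem.List.pyRange 1 (pvSqrt t + 1) 1).foldl
        (fun acc b =>
          if PySem.Int.mod t (b * b) == 0 then
            acc ++ [(a, b, PySem.Int.floordiv t (b * b))]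
          else acc) tr := by
  rw [PySem.List.foldl_append_if (fun dv => pvSqrt dv ^ 2 == dv)
        (fun dv => (a, pvSqrt dv, PySem.Int.floordiv t (pvSqrt dv ^ 2))),
      PySem.List.foldl_append_if (fun b => PySem.Int.mod t (b * b) == 0)
        (fun b => (a, b, PySem.Int.floordiv t (b * b)))]
  congr 1
  rw [squares_eq ht hsq, List.map_map]
  apply List.map_congr_left
  intro b hb
  have hb1 : 1 ≤ b := (PySem.List.mem_pyRange_one.mp (List.mem_of_mem_filter hb)).1
  simp [Function.comp, pow_two, pvSqrt_sq (by omega : (0:Int) ≤ b)]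

lemma loop_eq (num : Int) : ∀ (fuel : Nat) (k : Int), 0 ≤ k →
    ∀ tr, pvLoopA num fuel k tr = pvLoopB num fuel k tr := by
  intro fuel
  induction fuel with
  | zero => intro k _ tr; rfl
  | succ fuel ih =>
    intro k hk tr
    simp only [pvLoopA, pvLoopB]
    split
    · rw [inner_eq (T_ge_two hk) (T_not_square hk)]
      exact ih (k + 1) (by omega) _
    · rfl

-- ===== VERDICT (by name: the statement is the Claim_ definition above) =====
theorem cardano_triplets_spec : Claim_equal_cardano_triplets := by
  intro num _
  unfold Spec_cardano_triplets cardano_triplets cardano_triplets_alt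
  rw [loop_eq num _ 0 le_rfl]
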